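-- pv_equiv track=rewrite | github.com/Alirs2002/simple_network | chapter5/1.py | calculate
-- ===== SOURCE A (Python) =====
-- def calculate(n,listt):
--     listt = sorted(listt)
--     steps = 0
--     time = 0
--     for i in range(len(listt)):
--         if(time<listt[i]):
--             steps = steps+1
--             time = time+1
--
--     return steps
-- ===== SOURCE B (Python) =====
-- def calculate(n, listt):
--     # Descending sort + running-minimum of d[i]+i: answer is the largest k
--     # such that the k largest values can cover requirements 1..k.
--     d = sorted(listt, reverse=True)
--     cur_min = None
--     ans = 0
--     for i, x in enumerate(d):
--         v = x + i
--         if cur_min is None or v < cur_min: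
--             cur_min = v
--         if cur_min >= i + 1:
--             ans = i + 1
--     return ans
-- ===== Notes on version B (the rewrite author's own statement) =====
-- stated objective: alternative
-- what changed: Replaces A's ascending-sort count-and-increment greedy with a descending sort plus a single running-minimum scan of d[i]+i that records the largest feasible prefix length.
import Mathlib
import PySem

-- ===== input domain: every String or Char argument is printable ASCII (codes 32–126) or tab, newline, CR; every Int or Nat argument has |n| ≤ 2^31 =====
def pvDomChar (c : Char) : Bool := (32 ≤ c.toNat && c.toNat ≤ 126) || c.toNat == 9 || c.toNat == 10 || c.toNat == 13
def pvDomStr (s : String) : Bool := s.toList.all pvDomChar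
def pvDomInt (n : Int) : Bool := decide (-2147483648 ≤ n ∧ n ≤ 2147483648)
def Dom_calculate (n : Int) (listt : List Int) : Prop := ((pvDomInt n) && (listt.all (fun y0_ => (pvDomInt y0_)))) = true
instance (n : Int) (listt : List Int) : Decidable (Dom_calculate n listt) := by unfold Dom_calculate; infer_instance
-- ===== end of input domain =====

-- B sorts descending and scans once keeping the running minimum of d[i]+i, recording the
-- largest feasible prefix; same value as A's ascending greedy count (alternative algorithm).

-- ===== PORT A =====
def calculate (n : Int) (listt : List Int) : Int :=
  let l := PySem.List.sorted listt (fun x => x) false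
  (((PySem.List.pyRange 0 (l.length : Int) 1).foldl
      (fun (st : Int × Int) i =>
        if st.2 < PySem.List.pyGetD l i 0 then (st.1 + 1, st.2 + 1) else st)
      (0, 0))).1

-- ===== PORT B =====
-- the for-loop of Source B: j = enumerate index, m = cur_min (None before the first element), a = ans
def bLoop (d : List Int) (j : Int) (m : Option Int) (a : Int) : Int :=
  match d with
  | [] => a
  | x :: t =>
    let v := x + j
    let c := match m with
      | none => v
      | some c0 => min c0 v
    let a' := if j + 1 ≤ c then j + 1 else a
    bLoop t (j + 1) (some c) a'

def calculate_alt (n : Int) (listt : List Int) : Int :=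
  bLoop (PySem.List.sorted listt (fun x => x) true) 0 none 0

-- ===== PRECONDITION & SPEC =====
def Spec_calculate (n : Int) (listt : List Int) (out : Int) : Prop := out = calculate_alt n listt
instance (n : Int) (listt : List Int) (out : Int) : Decidable (Spec_calculate n listt out) := by unfold Spec_calculate; infer_instance

-- ===== CLAIM (what is proved, stated in full; the proofs are below) =====
def Claim_equal_calculate : Prop := ∀ (n : Int) (listt : List Int), Dom_calculate n listt → Spec_calculate n listt (calculate n listt)

-- ===== LEMMAS AND PROOFS =====

-- A's loop body on the single 'time' counter
def step1 (t x : Int) : Int := if t < x then t + 1 else t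

-- the greedy recursion on a DESCENDING list (middle man between the two ports)
def R : List Int → Int
  | [] => 0
  | x :: t => if R t < x then R t + 1 else R t

theorem R_nonneg : ∀ d : List Int, 0 ≤ R d := by
  intro d; induction d with
  | nil => simp [R]
  | cons x t ih => simp only [R]; split <;> omega

theorem R_le (t : List Int) (x : Int) (h : ∀ y ∈ t, y ≤ x) : R t ≤ max x 0 := by
  induction t with
  | nil => simp [R]
  | cons y s ih =>
    have hy : y ≤ x := h y (List.mem_cons_self ..)
    have ih' := ih (fun z hz => h z (List.mem_cons_of_mem _ hz))
    simp only [R]; split <;> omega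

-- A's paired fold keeps steps = time
theorem foldA_pair (l : List Int) (t : Int) :
    (l.foldl (fun (st : Int × Int) x => if st.2 < x then (st.1 + 1, st.2 + 1) else st) (t, t))
      = (l.foldl step1 t, l.foldl step1 t) := by
  induction l generalizing t with
  | nil => rfl
  | cons x s ih =>
    simp only [List.foldl, step1]
    split <;> simp [ih]

-- A's ascending fold is R of the reversed list
theorem R_eq_foldl_rev (d : List Int) : R d = d.reverse.foldl step1 0 := by
  induction d with
  | nil => rfl
  | cons x t ih =>
    simp only [R, List.reverse_cons, List.foldl_append, List.foldl, ih, step1]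

-- shifting the enumerate index by 1 shifts cur_min and ans by 1
theorem bLoop_shift (d : List Int) : ∀ (j c a : Int),
    bLoop d (j + 1) (some (c + 1)) (a + 1) = bLoop d j (some c) a + 1 := by
  induction d with
  | nil => intro j c a; rfl
  | cons x t ih =>
    intro j c a
    simp only [bLoop]
    rw [show x + (j + 1) = x + j + 1 by ring]
    have h1 : min (c + 1) (x + j + 1) = min c (x + j) + 1 := by omega
    simp only [h1]
    have h3 : (if j + 1 + 1 ≤ min c (x + j) + 1 then j + 1 + 1 else a + 1)
        = (if j + 1 ≤ min c (x + j) then j + 1 else a) + 1 := by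
      split_ifs with h h' h' <;> omega
    rw [h3, ih]

-- bLoop with an initial cap c computes min (R d) c, falling back to a
theorem bLoop_capped (d : List Int) (hd : d.Pairwise (fun a b => b ≤ a)) :
    ∀ (c a : Int), bLoop d 0 (some c) a = if 1 ≤ min (R d) c then min (R d) c else a := by
  induction d with
  | nil =>
    intro c a; simp only [bLoop, R]
    split <;> omega
  | cons x t ih =>
    intro c a
    have hx : ∀ y ∈ t, y ≤ x := (List.pairwise_cons.mp hd).1
    have ht : t.Pairwise (fun a b => b ≤ a) := (List.pairwise_cons.mp hd).2
    have hr0 : 0 ≤ R t := R_nonneg t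
    have hrx : R t ≤ max x 0 := R_le t x hx
    simp only [bLoop, add_zero, zero_add]
    have key := bLoop_shift t 0 (min c x - 1) ((if 1 ≤ min c x then (1 : Int) else a) - 1)
    have e1 : min c x - 1 + 1 = min c x := by omega
    have e2 : (if 1 ≤ min c x then (1 : Int) else a) - 1 + 1
        = (if 1 ≤ min c x then (1 : Int) else a) := by omega
    rw [e1, e2, zero_add] at key
    rw [key, ih ht]
    simp only [R]
    split_ifs <;> omega

theorem bLoop_eq_R (d : List Int) (hd : d.Pairwise (fun a b => b ≤ a)) :
    bLoop d 0 none 0 = R d := by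
  cases d with
  | nil => rfl
  | cons x t =>
    have hx : ∀ y ∈ t, y ≤ x := (List.pairwise_cons.mp hd).1
    have ht : t.Pairwise (fun a b => b ≤ a) := (List.pairwise_cons.mp hd).2
    have hr0 : 0 ≤ R t := R_nonneg t
    have hrx : R t ≤ max x 0 := R_le t x hx
    simp only [bLoop, add_zero, zero_add]
    have key := bLoop_shift t 0 (x - 1) ((if 1 ≤ x then (1 : Int) else 0) - 1)
    have e1 : x - 1 + 1 = x := by omega
    have e2 : (if 1 ≤ x then (1 : Int) else 0) - 1 + 1
        = (if 1 ≤ x then (1 : Int) else 0) := by omega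
    rw [e1, e2, zero_add] at key
    rw [key, bLoop_capped t ht]
    simp only [R]
    split_ifs <;> omega

-- the reverse of the ascending sort IS the descending sort
theorem rev_sorted_eq (xs : List Int) :
    (PySem.List.sorted xs (fun x => x) false).reverse = PySem.List.sorted xs (fun x => x) true := by
  have anti : Std.Antisymm (fun a b : Int => b ≤ a) := ⟨fun _ _ h h' => le_antisymm h' h⟩
  refine @List.Perm.eq_of_pairwise' _ _ anti _ _ ?_ ?_ ?_
  · exact List.pairwise_reverse.mpr (PySem.List.sorted_pairwise xs (fun x => x))
  · exact PySem.List.sorted_pairwise_rev xs (fun x => x)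
  · exact ((PySem.List.sorted xs (fun x => x) false).reverse_perm.trans
      (PySem.List.sorted_perm xs (fun x => x) false)).trans
      (PySem.List.sorted_perm xs (fun x => x) true).symm

-- ===== VERDICT (by name: the statement is the Claim_ definition above) =====
theorem calculate_spec : Claim_equal_calculate := by
  intro n listt _
  simp only [Spec_calculate, calculate, calculate_alt]
  rw [PySem.List.foldl_pyRange_zero_pyGetD' (PySem.List.sorted listt (fun x => x) false) 0
        (fun (st : Int × Int) v => if st.2 < v then (st.1 + 1, st.2 + 1) else st) ((0 : Int), (0 : Int))]
  rw [foldA_pair]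
  have hd : (PySem.List.sorted listt (fun x => x) true).Pairwise (fun a b : Int => b ≤ a) :=
    PySem.List.sorted_pairwise_rev listt (fun x => x)
  rw [bLoop_eq_R _ hd, ← rev_sorted_eq, R_eq_foldl_rev, List.reverse_reverse]
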